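-- pv_equiv track=rewrite | github.com/antman1935/stirling-to-type-b | StirlingPermutations.py | getStirlingReducedForm
-- ===== SOURCE A (Python) =====
-- def getDescents(perm):
--     descents = []
--     for i in range(len(perm)-1):
--         if perm[i] > perm[i+1]:
--             descents.append(i)
--     return descents
--
-- def findEndOfBlock(perm, index):
--     elm = perm[index]
--     elms = [elm - 1]
--     index += 1
--     while perm[index] != elm:
--         if perm[index] -1 != elms[-1]:
--             elms.append(perm[index] - 1)
--         index += 1
--     return index, elms
--
-- def findEndOfBlockWithNegatives(perm, index):
--     last_elm = perm[index]
--     elms = [-(last_elm-1)]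
--     index += 2
--     while perm[index] > last_elm:
--         last_elm = perm[index]
--         index += 2
--         elms.append(-(last_elm-1))
--     end, pos_elms = findEndOfBlock(perm, index)
--     return end, elms + pos_elms
--
-- def descentAfter(perm, descents, index):
--     for idx in descents:
--         if idx < index:
--             continue
--         else:
--             if perm[idx + 1] < perm[index]:
--                 return True
--     return False
--
-- def getStirlingReducedForm(perm):
--     blocks = []
--     descents = getDescents(perm)
--     index = 0
--     while index < len(perm) - 1:
--         elm = perm[index]
--         if perm[index + 1] != elm:
--             # rule 1: nesting
--             end_index, block = findEndOfBlock(perm, index)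
--             blocks.append(block)
--             index = end_index + 1
--         elif descentAfter(perm, descents, index):
--             # rule 2: negative block
--             end_index, block = findEndOfBlockWithNegatives(perm, index)
--             blocks.append(block)
--             index = end_index + 1
--         else:
--             # rule 3: positive singleton
--             blocks.append([elm - 1])
--             index += 2
--
--
--     return blocks
-- ===== SOURCE B (Python) =====
-- def _suffixMins(perm):
--     # sm[i] = smallest perm[d+1] over descent positions d >= i, or None if none
--     n = len(perm)
--     sm = [None] * n
--     cur = None
--     for i in range(n - 2, -1, -1):
--         y = perm[i + 1]
--         if perm[i] > y and (cur is None or y < cur):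
--             cur = y
--         sm[i] = cur
--     return sm
--
-- def _matchIndex(perm, elm, j):
--     # first position j' >= j with perm[j'] == elm
--     while perm[j] != elm:
--         j += 1
--     return j
--
-- def _reduceSeg(seg, last):
--     # values of seg, each minus one, with consecutive repeats (w.r.t. last) dropped
--     out = []
--     for v in seg:
--         if v - 1 != last:
--             out.append(v - 1)
--             last = v - 1
--     return out
--
-- def getStirlingReducedForm(perm):
--     n = len(perm)
--     sm = _suffixMins(perm)
--     blocks = []
--     i = 0
--     while i < n - 1:
--         elm = perm[i]
--         if perm[i + 1] != elm:
--             # nesting block: runs to the matching occurrence of elm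
--             end = _matchIndex(perm, elm, i + 1)
--             blocks.append([elm - 1] + _reduceSeg(perm[i + 1:end], elm - 1))
--             i = end + 1
--         elif sm[i] is not None and sm[i] < elm:
--             # negative block: ascending chain of doubled letters, then a nesting tail
--             neg = []
--             last = elm
--             j = i
--             while True:
--                 neg.append(-(last - 1))
--                 j += 2
--                 if not perm[j] > last:
--                     break
--                 last = perm[j]
--             end = _matchIndex(perm, perm[j], j + 1)
--             blocks.append(neg + [perm[j] - 1] + _reduceSeg(perm[j + 1:end], perm[j] - 1))
--             i = end + 1
--         else:
--             # positive singleton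
--             blocks.append([elm - 1])
--             i += 2
--     return blocks
-- ===== Notes on version B (the rewrite author's own statement) =====
-- stated objective: alternative
-- what changed: B precomputes one backward suffix-minimum array of perm[d+1] over descent positions so each rule-2 test is a single array lookup instead of A's rescan of the whole descent list, and builds each positive block by slicing to the matching occurrence and reducing the segment instead of A's element-by-element accumulator loop.
-- outside the precondition, e.g. on getStirlingReducedForm([1, 1, 2, 7, 9, 2, 5]): A returns [[0], [1, 6, 8]], B returns [[0], [1, 6, 8]]; on getStirlingReducedForm([3, 160, 3, -2, -3, -2]): A returns [[2, 159], [-3, -4]], B returns [[2, 159], [-3, -4]]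
import Mathlib
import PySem

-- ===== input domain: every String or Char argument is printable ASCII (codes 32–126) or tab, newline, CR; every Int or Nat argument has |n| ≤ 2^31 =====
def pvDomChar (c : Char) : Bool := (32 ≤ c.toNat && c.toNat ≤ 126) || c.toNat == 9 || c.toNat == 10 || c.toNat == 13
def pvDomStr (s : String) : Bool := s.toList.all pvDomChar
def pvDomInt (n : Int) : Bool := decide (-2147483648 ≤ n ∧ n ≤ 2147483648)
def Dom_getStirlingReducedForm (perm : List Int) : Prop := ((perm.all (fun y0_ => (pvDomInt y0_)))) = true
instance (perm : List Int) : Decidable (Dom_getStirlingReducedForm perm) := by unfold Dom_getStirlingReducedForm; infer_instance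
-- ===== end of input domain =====

-- B replaces A's per-position rescan of the descent list (descentAfter) by one precomputed
-- suffix-minimum array, and builds each block by slicing to the matching occurrence and
-- reducing the segment, instead of A's element-by-element accumulator loops (objective:
-- alternative algorithm; it trades A's repeated descent-list scans for one precomputed array).

-- ===== PORT A =====

-- getDescents: indices i with perm[i] > perm[i+1]
def getDescentsA (perm : List Int) : List Int :=
  (PySem.List.pyRange 0 ((perm.length : Int) - 1)).foldl
    (fun acc i =>
      if PySem.List.pyGetD perm (i + 1) 0 < PySem.List.pyGetD perm i 0 then acc ++ [i] else acc) []

-- findEndOfBlock's while loop; `none` = Python raises IndexError (scan past the end)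
def findEOB_A (perm : List Int) (elm : Int) : Nat → Int → List Int → Option (Int × List Int)
  | 0, _, _ => none
  | fuel + 1, index, elms =>
    match PySem.List.pyGet? perm index with
    | none => none
    | some v =>
      if v ≠ elm then
        findEOB_A perm elm fuel (index + 1)
          (if v - 1 ≠ PySem.List.pyGetD elms (-1) 0 then elms ++ [v - 1] else elms)
      else some (index, elms)

-- descentAfter: the for loop returns True at the first descent idx ≥ index with perm[idx+1] < perm[index]
def descentAfterA (perm : List Int) (descents : List Int) (index : Int) : Bool :=
  descents.any fun idx =>
    if idx < index then false
    else decide (PySem.List.pyGetD perm (idx + 1) 0 < PySem.List.pyGetD perm index 0)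

-- findEndOfBlockWithNegatives' while loop (entered with index already advanced by 2)
def findEOBNeg_A (perm : List Int) : Nat → Int → Int → List Int → Option (Int × List Int)
  | 0, _, _, _ => none
  | fuel + 1, index, last, elms =>
    match PySem.List.pyGet? perm index with
    | none => none
    | some v =>
      if v > last then findEOBNeg_A perm fuel (index + 2) v (elms ++ [-(v - 1)])
      else
        match findEOB_A perm v perm.length (index + 1) [v - 1] with
        | none => none
        | some (e, pos) => some (e, elms ++ pos)

-- the main while loop of getStirlingReducedForm; `blocks` is the growing accumulator
def mainA (perm : List Int) (descents : List Int) : Nat → Int → List (List Int) → List (List Int)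
  | 0, _, blocks => blocks
  | fuel + 1, index, blocks =>
    if index < (perm.length : Int) - 1 then
      let elm := PySem.List.pyGetD perm index 0
      if PySem.List.pyGetD perm (index + 1) 0 ≠ elm then
        match findEOB_A perm elm perm.length (index + 1) [elm - 1] with
        | none => blocks   -- Python raises here; unreachable when the Python returns
        | some (e, blk) => mainA perm descents fuel (e + 1) (blocks ++ [blk])
      else if descentAfterA perm descents index then
        match findEOBNeg_A perm perm.length (index + 2) elm [-(elm - 1)] with
        | none => blocks   -- Python raises here
        | some (e, blk) => mainA perm descents fuel (e + 1) (blocks ++ [blk])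
      else
        mainA perm descents fuel (index + 2) (blocks ++ [[elm - 1]])
    else blocks

def getStirlingReducedForm (perm : List Int) : List (List Int) :=
  mainA perm (getDescentsA perm) perm.length 0 []

-- ===== PORT B =====

-- one line of _suffixMins: cur = y if perm[i] > y and (cur is None or y < cur) else cur
def smUpdB (x y : Int) (cur : Option Int) : Option Int :=
  if x > y then
    match cur with
    | none => some y
    | some c => if y < c then some y else some c
  else cur

-- _suffixMins' backward fill, as right-to-left structural recursion over the list
def smOfB : List Int → List (Option Int)
  | [] => []
  | [_] => [none]
  | x :: y :: rest =>
    let tail := smOfB (y :: rest)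
    smUpdB x y (tail.headD none) :: tail

-- _matchIndex: first j' ≥ j with perm[j'] = elm; `none` = Python raises IndexError
def matchIdxB (perm : List Int) (elm : Int) : Nat → Int → Option Int
  | 0, _ => none
  | fuel + 1, j =>
    match PySem.List.pyGet? perm j with
    | none => none
    | some v => if v ≠ elm then matchIdxB perm elm fuel (j + 1) else some j

-- _reduceSeg: fold over the segment carrying (out, last)
def reduceSegB (seg : List Int) (last : Int) : List Int :=
  (seg.foldl (fun (p : List Int × Int) v =>
    if v - 1 ≠ p.2 then (p.1 ++ [v - 1], v - 1) else p) ([], last)).1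

-- the inner negative-chain loop of B; returns (stop index j, perm[j], negatives collected)
def negChainB (perm : List Int) : Nat → Int → Int → Option (Int × Int × List Int)
  | 0, _, _ => none
  | fuel + 1, j, last =>
    match PySem.List.pyGet? perm (j + 2) with
    | none => none
    | some v =>
      if v > last then
        match negChainB perm fuel (j + 2) v with
        | none => none
        | some (e, w, rest) => some (e, w, -(last - 1) :: rest)
      else some (j + 2, v, [-(last - 1)])

-- B's main while loop; the emitted blocks are the result, so the loop is the consing recursion
def mainB (perm : List Int) (sm : List (Option Int)) : Nat → Int → List (List Int)
  | 0, _ => []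
  | fuel + 1, i =>
    if i < (perm.length : Int) - 1 then
      let elm := PySem.List.pyGetD perm i 0
      if PySem.List.pyGetD perm (i + 1) 0 ≠ elm then
        match matchIdxB perm elm perm.length (i + 1) with
        | none => []   -- Python raises here
        | some e =>
          ((elm - 1) :: reduceSegB (PySem.List.slice perm (some (i + 1)) (some e)) (elm - 1))
            :: mainB perm sm fuel (e + 1)
      else if (match PySem.List.pyGetD sm i none with | none => false | some m => decide (m < elm)) then
        match negChainB perm perm.length i elm with
        | none => []   -- Python raises here
        | some (j, v, neg) =>
          match matchIdxB perm v perm.length (j + 1) with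
          | none => []   -- Python raises here
          | some e =>
            (neg ++ (v - 1) :: reduceSegB (PySem.List.slice perm (some (j + 1)) (some e)) (v - 1))
              :: mainB perm sm fuel (e + 1)
      else [elm - 1] :: mainB perm sm fuel (i + 2)
    else []

def getStirlingReducedForm_alt (perm : List Int) : List (List Int) :=
  mainB perm (smOfB perm) perm.length 0

-- ===== PRECONDITION & SPEC =====
-- Pre_ admits the function's natural domain — generalized Stirling permutations (every value
-- occurs exactly twice, values between the two occurrences of v are all larger than v) — widened
-- by simple further shapes on which A provably returns (lists of length ≤ 1, constant lists, a
-- doubled head x,x,c with x ≤ c, and a single matched block with at most one trailing element).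
-- A also happens to return on some further malformed lists whose greedy parse terminates by
-- luck; Pre_ excludes those only because they have no simple closed-form description — B returns
-- the same value as A there (the port equality below is proved unconditionally).
def Pre_getStirlingReducedForm (perm : List Int) : Prop :=
  perm.length ≤ 1
  ∨ (∀ v ∈ perm, v = perm.headD 0)
  ∨ ((∀ v ∈ perm, perm.count v = 2) ∧
     (∀ i ∈ List.range perm.length, ∀ j ∈ List.range perm.length, ∀ k ∈ List.range perm.length,
       i < j → j < k → perm.getD i 0 = perm.getD k 0 → perm.getD i 0 < perm.getD j 0))
  ∨ (perm.length = 3 ∧ perm.getD 0 0 = perm.getD 1 0 ∧ perm.getD 0 0 ≤ perm.getD 2 0)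
  ∨ (2 ≤ perm.length ∧ perm.getD 0 0 ≠ perm.getD 1 0 ∧
     ∃ j ∈ List.range perm.length, 1 ≤ j ∧ perm.getD j 0 = perm.getD 0 0 ∧
       (∀ k ∈ List.range j, 1 ≤ k → perm.getD k 0 ≠ perm.getD 0 0) ∧ perm.length ≤ j + 2)

instance (perm : List Int) : Decidable (Pre_getStirlingReducedForm perm) := by
  unfold Pre_getStirlingReducedForm; infer_instance

def pvWitness_getStirlingReducedForm : List Int := [1, 2, 2, 1]

def Spec_getStirlingReducedForm (perm : List Int) (out : List (List Int)) : Prop :=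
  out = getStirlingReducedForm_alt perm
instance (perm : List Int) (out : List (List Int)) : Decidable (Spec_getStirlingReducedForm perm out) := by
  unfold Spec_getStirlingReducedForm; infer_instance

-- ===== CLAIM (what is proved, stated in full; the proofs are below) =====
def Claim_equal_getStirlingReducedForm : Prop :=
  ∀ (perm : List Int), Dom_getStirlingReducedForm perm → Pre_getStirlingReducedForm perm →
    Spec_getStirlingReducedForm perm (getStirlingReducedForm perm)

-- ===== LEMMAS AND PROOFS =====
-- The port equality is proved unconditionally (for every List Int); the Pre_ hypothesis of the
-- claim only delimits where the Python programs return instead of raising.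

theorem reduceSeg_acc (seg : List Int) : ∀ (acc : List Int) (last : Int),
    (seg.foldl (fun (p : List Int × Int) v =>
      if v - 1 ≠ p.2 then (p.1 ++ [v - 1], v - 1) else p) (acc, last)).1
      = acc ++ reduceSegB seg last := by
  induction seg with
  | nil => intro acc last; simp [reduceSegB]
  | cons v seg ih =>
    intro acc last
    simp only [reduceSegB, List.foldl_cons]
    by_cases h : v - 1 ≠ last
    · simp only [if_pos h, ih]
      simp
    · simp only [if_neg h, ih]
      rfl

theorem reduceSeg_cons (v : Int) (seg : List Int) (last : Int) :
    reduceSegB (v :: seg) last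
      = if v - 1 ≠ last then (v - 1) :: reduceSegB seg (v - 1) else reduceSegB seg last := by
  simp only [reduceSegB, List.foldl_cons]
  by_cases h : v - 1 ≠ last
  · simp only [if_pos h]
    have := reduceSeg_acc seg [v-1] (v-1)
    simp [reduceSegB] at this ⊢
    rw [this]
  · simp [if_neg h]

theorem slice_cons {perm : List Int} {j e : Int} {v : Int}
    (h0 : 0 ≤ j) (hje : j < e) (hv : PySem.List.pyGet? perm j = some v) :
    PySem.List.slice perm (some j) (some e) = v :: PySem.List.slice perm (some (j+1)) (some e) := by
  have he : 0 ≤ e := le_of_lt (lt_of_le_of_lt h0 hje)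
  rw [PySem.List.slice_toNat perm h0 he, PySem.List.slice_toNat perm (by omega) he]
  rw [PySem.List.pyGet?_of_nonneg perm h0] at hv
  have hlt : j.toNat < perm.length := by
    by_contra hh
    rw [List.getElem?_eq_none (by omega)] at hv
    simp at hv
  have hget : perm[j.toNat] = v := by
    have := List.getElem?_eq_getElem hlt
    rw [this] at hv; exact Option.some.inj hv
  have hdrop : perm.drop j.toNat = v :: perm.drop (j.toNat + 1) := by
    rw [List.drop_eq_getElem_cons hlt, hget]
  rw [hdrop]
  have h1 : (j+1).toNat = j.toNat + 1 := by omega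
  have h2 : e.toNat - j.toNat = (e.toNat - (j.toNat + 1)) + 1 := by omega
  rw [h1, h2, List.take_succ_cons]

theorem matchIdx_ge (perm : List Int) (elm : Int) :
    ∀ fuel (j e : Int), matchIdxB perm elm fuel j = some e → j ≤ e := by
  intro fuel
  induction fuel with
  | zero => intro j e h; simp [matchIdxB] at h
  | succ fuel ih =>
    intro j e h
    simp only [matchIdxB] at h
    cases hv : PySem.List.pyGet? perm j with
    | none => rw [hv] at h; simp at h
    | some v =>
      rw [hv] at h
      dsimp only at h
      by_cases he : v ≠ elm
      · rw [if_pos he] at h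
        have := ih (j+1) e h
        omega
      · rw [if_neg he] at h
        simp at h
        omega

theorem slice_self (perm : List Int) (j : Int) (h0 : 0 ≤ j) :
    PySem.List.slice perm (some j) (some j) = [] := by
  rw [PySem.List.slice_toNat perm h0 h0]
  simp

theorem findEOB_eq (perm : List Int) (elm : Int) :
    ∀ fuel (j : Int) (elms : List Int), 0 ≤ j →
      findEOB_A perm elm fuel j elms =
        match matchIdxB perm elm fuel j with
        | none => none
        | some e => some (e, elms ++ reduceSegB (PySem.List.slice perm (some j) (some e))
            (PySem.List.pyGetD elms (-1) 0)) := by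
  intro fuel
  induction fuel with
  | zero => intro j elms h0; simp [findEOB_A, matchIdxB]
  | succ fuel ih =>
    intro j elms h0
    simp only [findEOB_A, matchIdxB]
    cases hv : PySem.List.pyGet? perm j with
    | none => simp
    | some v =>
      simp only
      by_cases he : v ≠ elm
      · rw [if_pos he, if_pos he]
        set elms' := if v - 1 ≠ PySem.List.pyGetD elms (-1) 0 then elms ++ [v - 1] else elms with helms'
        rw [ih (j+1) elms' (by omega)]
        cases hm : matchIdxB perm elm fuel (j+1) with
        | none => simp
        | some e =>
          simp only
          have hje : j < e := by have := matchIdx_ge perm elm fuel (j+1) e hm; omega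
          rw [slice_cons h0 hje hv, reduceSeg_cons]
          by_cases hc : v - 1 ≠ PySem.List.pyGetD elms (-1) 0
          · rw [if_pos hc]
            have h1 : elms' = elms ++ [v-1] := by rw [helms', if_pos hc]
            rw [h1, PySem.List.pyGetD_neg_one_append_singleton]
            simp
          · rw [if_neg hc]
            have h1 : elms' = elms := by rw [helms', if_neg hc]
            rw [h1]
      · rw [if_neg he, if_neg he]
        simp only
        rw [slice_self perm j h0]
        simp [reduceSegB]

theorem negChain_eq (perm : List Int) :
    ∀ fuel (j last : Int) (acc : List Int), 0 ≤ j →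
      findEOBNeg_A perm fuel (j + 2) last (acc ++ [-(last - 1)]) =
        match negChainB perm fuel j last with
        | none => none
        | some (e, v, neg) =>
          match matchIdxB perm v perm.length (e + 1) with
          | none => none
          | some e2 => some (e2, acc ++ neg ++ (v - 1) ::
              reduceSegB (PySem.List.slice perm (some (e + 1)) (some e2)) (v - 1)) := by
  intro fuel
  induction fuel with
  | zero => intro j last acc h0; simp [findEOBNeg_A, negChainB]
  | succ fuel ih =>
    intro j last acc h0
    simp only [findEOBNeg_A, negChainB]
    cases hv : PySem.List.pyGet? perm (j + 2) with
    | none => simp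
    | some v =>
      simp only
      by_cases hgt : v > last
      · rw [if_pos hgt, if_pos hgt]
        have := ih (j + 2) v (acc ++ [-(last - 1)]) (by omega)
        have harr : j + 2 + 2 = j + 4 := by ring
        rw [harr] at this ⊢
        rw [this]
        cases negChainB perm fuel (j + 2) v with
        | none => simp
        | some t =>
          obtain ⟨e, w, rest⟩ := t
          simp only
          cases matchIdxB perm w perm.length (e + 1) with
          | none => simp
          | some e2 => simp
      · rw [if_neg hgt, if_neg hgt]
        rw [findEOB_eq perm v perm.length (j + 2 + 1) [v - 1] (by omega)]
        simp only
        cases matchIdxB perm v perm.length (j + 2 + 1) with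
        | none => simp
        | some e2 =>
          simp only
          have : PySem.List.pyGetD ([] ++ [v - 1] : List Int) (-1) 0 = v - 1 :=
            PySem.List.pyGetD_neg_one_append_singleton ..
          simp at this
          rw [this]
          simp

def smLt (o : Option Int) (t : Int) : Bool :=
  match o with | none => false | some m => decide (m < t)

theorem smLt_iff (o : Option Int) (t : Int) :
    smLt o t = true ↔ ∃ c, o = some c ∧ c < t := by
  cases o <;> simp [smLt]

theorem smUpd_lt (x y : Int) (cur : Option Int) (t : Int) :
    smLt (smUpdB x y cur) t = true ↔ (y < x ∧ y < t) ∨ (∃ c, cur = some c ∧ c < t) := by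
  unfold smUpdB
  by_cases hxy : x > y
  · rw [if_pos hxy]
    cases cur with
    | none => simp [smLt]; omega
    | some c =>
      dsimp only
      by_cases hyc : y < c
      · rw [if_pos hyc]; simp [smLt]; omega
      · rw [if_neg hyc]; simp [smLt]; omega
  · rw [if_neg hxy]
    rw [smLt_iff]
    constructor
    · rintro ⟨c, hc, hlt⟩; exact Or.inr ⟨c, hc, hlt⟩
    · rintro (⟨h1, _⟩ | ⟨c, hc, hlt⟩)
      · omega
      · exact ⟨c, hc, hlt⟩

theorem smOf_length : ∀ l : List Int, (smOfB l).length = l.length := by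
  intro l
  induction l with
  | nil => rfl
  | cons x l ih =>
    cases l with
    | nil => rfl
    | cons y rest => simp only [smOfB, List.length_cons] at ih ⊢; omega

theorem smOf_drop : ∀ (l : List Int) (i : Nat), (smOfB l).drop i = smOfB (l.drop i) := by
  intro l
  induction l with
  | nil => intro i; simp [smOfB]
  | cons x l ih =>
    intro i
    cases i with
    | zero => simp
    | succ i' =>
      cases l with
      | nil => simp [smOfB]
      | cons y rest =>
        simp only [smOfB, List.drop_succ_cons]
        exact ih i'

theorem smOf_head_lt : ∀ (l : List Int) (t : Int),
    smLt ((smOfB l).headD none) t = true ↔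
      ∃ k : Nat, k + 1 < l.length ∧ l[k+1]! < l[k]! ∧ l[k+1]! < t := by
  intro l
  induction l with
  | nil => intro t; simp [smOfB, smLt]
  | cons x l ih =>
    intro t
    cases l with
    | nil =>
      simp [smOfB, smLt]
    | cons y rest =>
      simp only [smOfB, List.headD_cons]
      rw [smUpd_lt]
      constructor
      · rintro (⟨h1, h2⟩ | hc)
        · exact ⟨0, by simp, by simp [h1, h2]⟩
        · rw [← smLt_iff] at hc
          obtain ⟨k, hk, ha, hb⟩ := (ih t).mp hc
          refine ⟨k + 1, by simpa using hk, ?_, ?_⟩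
          · simpa using ha
          · simpa using hb
      · rintro ⟨k, hk, ha, hb⟩
        cases k with
        | zero =>
          left
          constructor
          · simpa using ha
          · simpa using hb
        | succ k' =>
          right
          rw [← smLt_iff]
          refine (ih t).mpr ⟨k', by simpa using hk, ?_, ?_⟩
          · simpa using ha
          · simpa using hb

theorem getDescentsA_eq (perm : List Int) :
    getDescentsA perm = (PySem.List.pyRange 0 ((perm.length : Int) - 1)).filter
      (fun i => decide (PySem.List.pyGetD perm (i + 1) 0 < PySem.List.pyGetD perm i 0)) := by
  unfold getDescentsA
  have h : (fun (acc : List Int) (i : Int) =>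
      if PySem.List.pyGetD perm (i + 1) 0 < PySem.List.pyGetD perm i 0 then acc ++ [i] else acc)
      = (fun acc i =>
      if (fun i => decide (PySem.List.pyGetD perm (i + 1) 0 < PySem.List.pyGetD perm i 0)) i = true
        then acc ++ [(id i : Int)] else acc) := by
    funext acc i; simp
  rw [h, PySem.List.foldl_append_if]
  simp

theorem descentAfter_iff (perm : List Int) (index : Int) (h0 : 0 ≤ index)
    (hn : index < (perm.length : Int) - 1) :
    descentAfterA perm (getDescentsA perm) index = true ↔
      ∃ k : Nat, index.toNat ≤ k ∧ k + 1 < perm.length ∧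
        perm[k+1]! < perm[k]! ∧ perm[k+1]! < perm[index.toNat]! := by
  rw [descentAfterA, getDescentsA_eq, List.any_eq_true]
  constructor
  · rintro ⟨idx, hmem, hp⟩
    rw [List.mem_filter] at hmem
    obtain ⟨hr, hd⟩ := hmem
    rw [PySem.List.mem_pyRange_one] at hr
    by_cases hlt : idx < index
    · rw [if_pos hlt] at hp; simp at hp
    · rw [if_neg hlt] at hp
      simp only [decide_eq_true_eq] at hp hd
      refine ⟨idx.toNat, by omega, by omega, ?_, ?_⟩
      · have e1 : PySem.List.pyGetD perm (idx + 1) 0 = perm[idx.toNat + 1]! := by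
          rw [PySem.List.pyGetD_eq_getElem perm 0 (by omega) (by omega)]
          rw [getElem!_pos _ _ (by omega)]
          try (congr 1 <;> omega); try simp
        have e2 : PySem.List.pyGetD perm idx 0 = perm[idx.toNat]! := by
          rw [PySem.List.pyGetD_eq_getElem perm 0 (by omega) (by omega)]
          rw [getElem!_pos _ _ (by omega)]
        rw [← e1, ← e2]; exact hd
      · have e1 : PySem.List.pyGetD perm (idx + 1) 0 = perm[idx.toNat + 1]! := by
          rw [PySem.List.pyGetD_eq_getElem perm 0 (by omega) (by omega)]
          rw [getElem!_pos _ _ (by omega)]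
          try (congr 1 <;> omega); try simp
        have e3 : PySem.List.pyGetD perm index 0 = perm[index.toNat]! := by
          rw [PySem.List.pyGetD_eq_getElem perm 0 (by omega) (by omega)]
          rw [getElem!_pos _ _ (by omega)]
        rw [← e1, ← e3]; exact hp
  · rintro ⟨k, hik, hk, ha, hb⟩
    refine ⟨(k : Int), ?_, ?_⟩
    · rw [List.mem_filter, PySem.List.mem_pyRange_one]
      refine ⟨⟨by omega, by omega⟩, ?_⟩
      simp only [decide_eq_true_eq]
      have e1 : PySem.List.pyGetD perm ((k : Int) + 1) 0 = perm[k + 1]! := by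
        rw [PySem.List.pyGetD_eq_getElem perm 0 (by omega) (by omega)]
        simp only [show ((k : Int) + 1).toNat = k + 1 from by omega,
          show ((k : Int)).toNat = k from by omega]
        rw [getElem!_pos _ _ (by omega)]
      have e2 : PySem.List.pyGetD perm (k : Int) 0 = perm[k]! := by
        rw [PySem.List.pyGetD_eq_getElem perm 0 (by omega) (by omega)]
        simp only [show ((k : Int) + 1).toNat = k + 1 from by omega,
          show ((k : Int)).toNat = k from by omega]
        rw [getElem!_pos _ _ (by omega)]
      rw [e1, e2]; exact ha
    · rw [if_neg (by omega)]
      simp only [decide_eq_true_eq]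
      have e1 : PySem.List.pyGetD perm ((k : Int) + 1) 0 = perm[k + 1]! := by
        rw [PySem.List.pyGetD_eq_getElem perm 0 (by omega) (by omega)]
        simp only [show ((k : Int) + 1).toNat = k + 1 from by omega,
          show ((k : Int)).toNat = k from by omega]
        rw [getElem!_pos _ _ (by omega)]
      have e3 : PySem.List.pyGetD perm index 0 = perm[index.toNat]! := by
        rw [PySem.List.pyGetD_eq_getElem perm 0 (by omega) (by omega)]
        rw [getElem!_pos _ _ (by omega)]
      rw [e1, e3]; exact hb

theorem descent_test_eq (perm : List Int) (index : Int) (h0 : 0 ≤ index)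
    (hn : index < (perm.length : Int) - 1) :
    descentAfterA perm (getDescentsA perm) index
      = smLt (PySem.List.pyGetD (smOfB perm) index none) (PySem.List.pyGetD perm index 0) := by
  set i := index.toNat with hi
  have hlen : (smOfB perm).length = perm.length := smOf_length perm
  have hiLt : i < perm.length := by omega
  have h1 : PySem.List.pyGetD (smOfB perm) index none = ((smOfB (perm.drop i)).headD none) := by
    rw [PySem.List.pyGetD_eq_getElem (smOfB perm) none h0 (by omega)]
    rw [← smOf_drop]
    have hne : i < (smOfB perm).length := by omega
    rw [List.headD_eq_head?_getD, List.head?_drop]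
    simp [List.getElem?_eq_getElem hne]
    rfl
  have h2 : PySem.List.pyGetD perm index 0 = perm[i]! := by
    rw [PySem.List.pyGetD_eq_getElem perm 0 h0 (by omega)]
    rw [getElem!_pos perm i hiLt]
  rw [h1, h2]
  rw [Bool.eq_iff_iff]
  rw [descentAfter_iff perm index h0 hn, smOf_head_lt]
  constructor
  · rintro ⟨k, hik, hk, ha, hb⟩
    refine ⟨k - i, ?_, ?_, ?_⟩
    · rw [List.length_drop]; omega
    · have e1 : (perm.drop i)[k - i + 1]! = perm[k + 1]! := by
        rw [getElem!_pos _ _ (by rw [List.length_drop]; omega),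
            getElem!_pos _ _ (by omega), List.getElem_drop]
        try (congr 1 <;> omega)
      have e2 : (perm.drop i)[k - i]! = perm[k]! := by
        rw [getElem!_pos _ _ (by rw [List.length_drop]; omega),
            getElem!_pos _ _ (by omega), List.getElem_drop]
        try (congr 1 <;> omega)
      rw [e1, e2]; exact ha
    · have e1 : (perm.drop i)[k - i + 1]! = perm[k + 1]! := by
        rw [getElem!_pos _ _ (by rw [List.length_drop]; omega),
            getElem!_pos _ _ (by omega), List.getElem_drop]
        try (congr 1 <;> omega)
      rw [e1]; exact hb
  · rintro ⟨k', hk', ha, hb⟩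
    rw [List.length_drop] at hk'
    refine ⟨i + k', by omega, by omega, ?_, ?_⟩
    · have e1 : (perm.drop i)[k' + 1]! = perm[i + k' + 1]! := by
        rw [getElem!_pos _ _ (by rw [List.length_drop]; omega),
            getElem!_pos _ _ (by omega), List.getElem_drop]
        try (congr 1 <;> omega)
      have e2 : (perm.drop i)[k']! = perm[i + k']! := by
        rw [getElem!_pos _ _ (by rw [List.length_drop]; omega),
            getElem!_pos _ _ (by omega), List.getElem_drop]
        try (congr 1 <;> omega)
      rw [← e1, ← e2]; exact ha
    · have e1 : (perm.drop i)[k' + 1]! = perm[i + k' + 1]! := by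
        rw [getElem!_pos _ _ (by rw [List.length_drop]; omega),
            getElem!_pos _ _ (by omega), List.getElem_drop]
        try (congr 1 <;> omega)
      rw [← e1]; exact hb

theorem negChain_ge (perm : List Int) :
    ∀ fuel (j last e v : Int) (neg : List Int),
      negChainB perm fuel j last = some (e, v, neg) → j + 2 ≤ e := by
  intro fuel
  induction fuel with
  | zero => intro j last e v neg h; simp [negChainB] at h
  | succ fuel ih =>
    intro j last e v neg h
    simp only [negChainB] at h
    cases hv : PySem.List.pyGet? perm (j + 2) with
    | none => rw [hv] at h; simp at h
    | some w =>
      rw [hv] at h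
      dsimp only at h
      by_cases hgt : w > last
      · rw [if_pos hgt] at h
        cases hn : negChainB perm fuel (j + 2) w with
        | none => rw [hn] at h; simp at h
        | some t =>
          obtain ⟨e', w', rest⟩ := t
          rw [hn] at h
          simp at h
          have := ih (j + 2) w e' w' rest hn
          omega
      · rw [if_neg hgt] at h
        simp at h
        omega

theorem mainAB (perm : List Int) :
    ∀ fuel (index : Int) (blocks : List (List Int)), 0 ≤ index →
      mainA perm (getDescentsA perm) fuel index blocks
        = blocks ++ mainB perm (smOfB perm) fuel index := by
  intro fuel
  induction fuel with
  | zero => intro index blocks h0; simp [mainA, mainB]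
  | succ fuel ih =>
    intro index blocks h0
    simp only [mainA, mainB]
    by_cases hg : index < (perm.length : Int) - 1
    · rw [if_pos hg, if_pos hg]
      by_cases hb1 : PySem.List.pyGetD perm (index + 1) 0 ≠ PySem.List.pyGetD perm index 0
      · rw [if_pos hb1, if_pos hb1]
        rw [findEOB_eq perm _ perm.length (index + 1) _ (by omega)]
        have hlast : PySem.List.pyGetD [PySem.List.pyGetD perm index 0 - 1] (-1) 0
            = PySem.List.pyGetD perm index 0 - 1 := by
          have h := PySem.List.pyGetD_neg_one_append_singleton
            (xs := ([] : List Int)) (x := PySem.List.pyGetD perm index 0 - 1) (d := 0)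
          simpa using h
        rw [hlast]
        cases hm : matchIdxB perm (PySem.List.pyGetD perm index 0) perm.length (index + 1) with
        | none => simp
        | some e =>
          have he : index + 1 ≤ e := matchIdx_ge perm _ perm.length (index + 1) e hm
          dsimp only
          rw [ih (e + 1) (blocks ++ [_]) (by omega)]
          simp
      · rw [if_neg hb1, if_neg hb1]
        have hd := descent_test_eq perm index h0 hg
        unfold smLt at hd
        rw [← hd]
        cases hdc : descentAfterA perm (getDescentsA perm) index with
        | false => rw [ih (index + 2) (blocks ++ [_]) (by omega)]; simp
        | true =>
          simp only [if_pos rfl]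
          have hacc := negChain_eq perm perm.length index (PySem.List.pyGetD perm index 0)
            ([] : List Int) h0
          simp only [List.nil_append] at hacc
          rw [hacc]
          cases hn : negChainB perm perm.length index (PySem.List.pyGetD perm index 0) with
          | none => simp
          | some t =>
            obtain ⟨e, v, neg⟩ := t
            have hge : index + 2 ≤ e := negChain_ge perm perm.length index _ e v neg hn
            dsimp only
            cases hm : matchIdxB perm v perm.length (e + 1) with
            | none => simp
            | some e2 =>
              have he2 : e + 1 ≤ e2 := matchIdx_ge perm v perm.length (e + 1) e2 hm
              dsimp only
              rw [ih (e2 + 1) (blocks ++ [_]) (by omega)]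
              simp
    · rw [if_neg hg, if_neg hg]
      simp

-- ===== VERDICT (by name: the statement is the Claim_ definition above) =====
theorem getStirlingReducedForm_spec : Claim_equal_getStirlingReducedForm := by
  intro perm _dom _pre
  unfold Spec_getStirlingReducedForm getStirlingReducedForm getStirlingReducedForm_alt
  simpa using mainAB perm perm.length 0 [] le_rfl
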